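-- pv_equiv track=rewrite | github.com/Yale-CTRA/Helper | utilities.py | recursive_split
-- ===== SOURCE A (Python) =====
-- def recursive_split(contents, splits):
--     index = contents.find('\n\n')
--     if index == -1:
--         return splits
--     else:
--         splits.append(contents[:index])
--         contents = contents[index+2:]
--         splits = recursive_split(contents, splits)
--         return splits
-- ===== SOURCE B (Python) =====
-- def recursive_split(contents, splits):
--     cur = []
--     i = 0
--     n = len(contents)
--     while i < n:
--         if contents.startswith('\n\n', i):
--             splits.append(''.join(cur))
--             cur = []
--             i += 2
--         else:
--             cur.append(contents[i])
--             i += 1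
--     return splits
-- ===== Notes on version B (the rewrite author's own statement) =====
-- stated objective: alternative
-- what changed: Replaces A's repeated find('\n\n') + reslice recursion with a single left-to-right character scan that accumulates the current chunk and flushes it at each separator, dropping the trailing chunk.
import Mathlib
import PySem

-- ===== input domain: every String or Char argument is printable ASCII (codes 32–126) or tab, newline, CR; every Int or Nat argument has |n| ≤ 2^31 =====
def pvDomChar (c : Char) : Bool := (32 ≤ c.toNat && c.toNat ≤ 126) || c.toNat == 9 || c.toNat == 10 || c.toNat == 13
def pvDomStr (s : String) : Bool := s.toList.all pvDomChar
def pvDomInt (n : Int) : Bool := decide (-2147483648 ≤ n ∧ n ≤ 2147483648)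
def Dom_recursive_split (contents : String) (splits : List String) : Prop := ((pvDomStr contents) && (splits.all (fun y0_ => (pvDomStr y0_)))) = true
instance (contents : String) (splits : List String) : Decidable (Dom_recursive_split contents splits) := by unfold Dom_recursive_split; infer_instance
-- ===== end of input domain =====

-- B replaces A's repeated find-and-reslice recursion by a single left-to-right
-- character scan with a current-chunk accumulator (objective: alternative).
-- Both A and B mutate/extend the 'splits' list argument in place in Python; the
-- equivalence proved here is about the returned value (the mutation is the same).

-- ===== PORT A =====
def recursive_split (contents : String) (splits : List String) : List String :=
  let index := PySem.Str.find contents "\n\n"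
  if _h : index = -1 then splits
  else
    recursive_split (PySem.Str.slice contents (some (index + 2)) none)
      (splits ++ [PySem.Str.slice contents none (some index)])
termination_by contents.toList.length
decreasing_by
  have h1 : -1 ≤ PySem.Str.find contents "\n\n" := by
    simpa using PySem.Chars.neg_one_le_find contents.toList "\n\n".toList
  have h0 : 0 ≤ PySem.Str.find contents "\n\n" := by
    rcases lt_or_eq_of_le h1 with h | h
    · omega
    · exact absurd h.symm _h
  have hinf : "\n\n".toList <:+: contents.toList := by
    rw [← PySem.Chars.find_ne_neg_one_iff]
    simpa using _h
  have hlen : 2 ≤ contents.toList.length := by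
    have := hinf.length_le
    simpa using this
  have hcast : PySem.Str.find contents "\n\n" + 2
      = (((PySem.Str.find contents "\n\n").toNat + 2 : Nat) : Int) := by omega
  rw [PySem.Str.toList_slice, PySem.Chars.slice_eq_listSlice, hcast,
    PySem.List.slice_from_natCast, List.length_drop]
  omega

-- ===== PORT B =====
-- cur is the current chunk (in order); at "\n\n" it is flushed, a trailing chunk is dropped.
def rsAltGo : List Char → List Char → List String → List String
  | [], _cur, splits => splits
  | [c], cur, splits => rsAltGo [] (cur ++ [c]) splits
  | c :: d :: rest, cur, splits =>
    if c = '\n' ∧ d = '\n' then rsAltGo rest [] (splits ++ [String.ofList cur])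
    else rsAltGo (d :: rest) (cur ++ [c]) splits

def recursive_split_alt (contents : String) (splits : List String) : List String :=
  rsAltGo contents.toList [] splits

-- ===== PRECONDITION & SPEC =====
def Spec_recursive_split (contents : String) (splits : List String) (out : List String) : Prop := out = recursive_split_alt contents splits
instance (contents : String) (splits : List String) (out : List String) : Decidable (Spec_recursive_split contents splits out) := by unfold Spec_recursive_split; infer_instance

-- ===== CLAIM (what is proved, stated in full; the proofs are below) =====
def Claim_equal_recursive_split : Prop := ∀ (contents : String) (splits : List String), Dom_recursive_split contents splits → Spec_recursive_split contents splits (recursive_split contents splits)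

-- ===== LEMMAS AND PROOFS =====

lemma nl_toList : "\n\n".toList = ['\n', '\n'] := by decide

-- no occurrence of "\n\n" when at most one char remains after a clean prefix cur
lemma rs_no_occ (cur s : List Char) (hs : s.length ≤ 1)
    (h : ∀ j, j < cur.length → ¬ ['\n','\n'] <+: (cur ++ s).drop j) :
    PySem.Chars.find (cur ++ s) ['\n','\n'] = -1 := by
  rw [PySem.Chars.find_eq_neg_one_iff]
  intro hinf
  have hIn : PySem.Chars.isIn ['\n','\n'] (cur ++ s) = true :=
    (PySem.Chars.isIn_iff_infix _ _).mpr hinf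
  obtain ⟨j, hj⟩ := (PySem.Chars.exists_prefix_drop_iff_isIn _ _).mpr hIn
  have hlen : 2 ≤ ((cur ++ s).drop j).length := by simpa using hj.length_le
  have hjlt : j < cur.length := by
    simp [List.length_drop, List.length_append] at hlen
    omega
  exact h j hjlt hj

-- the first occurrence of "\n\n" in cur ++ '\n'::'\n'::rest is at cur.length
lemma rs_find_at (cur rest : List Char)
    (h : ∀ j, j < cur.length → ¬ ['\n','\n'] <+: (cur ++ '\n'::'\n'::rest).drop j) :
    PySem.Chars.find (cur ++ '\n'::'\n'::rest) ['\n','\n'] = (cur.length : Int) := by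
  have hdrop : (cur ++ '\n'::'\n'::rest).drop cur.length = '\n'::'\n'::rest :=
    List.drop_left
  have hpre : ['\n','\n'] <+: (cur ++ '\n'::'\n'::rest).drop cur.length := by
    rw [hdrop]; exact ⟨rest, rfl⟩
  have hinf : ['\n','\n'] <:+: (cur ++ '\n'::'\n'::rest) :=
    hpre.isInfix.trans (List.drop_suffix _ _).isInfix
  have h0 : 0 ≤ PySem.Chars.find (cur ++ '\n'::'\n'::rest) ['\n','\n'] :=
    (PySem.Chars.find_nonneg_iff _ _).mpr hinf
  obtain ⟨hp, hmin⟩ := PySem.Chars.find_spec h0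
  rcases lt_trichotomy (PySem.Chars.find (cur ++ '\n'::'\n'::rest) ['\n','\n']).toNat
      cur.length with hlt | heq | hgt
  · exact absurd hp (h _ hlt)
  · omega
  · exact absurd hpre (hmin _ hgt)

-- main invariant: A on the whole remaining string = B's scan with accumulator cur
lemma rs_eq_go (n : Nat) : ∀ (s cur : List Char) (splits : List String), s.length ≤ n →
    (∀ j, j < cur.length → ¬ ['\n','\n'] <+: (cur ++ s).drop j) →
    recursive_split (String.ofList (cur ++ s)) splits = rsAltGo s cur splits := by
  induction n with
  | zero =>
    intro s cur splits hn h
    have hs : s = [] := List.length_eq_zero_iff.mp (Nat.le_zero.mp hn)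
    subst hs
    rw [recursive_split]
    have hfind : PySem.Chars.find cur ['\n','\n'] = -1 := by
      simpa using rs_no_occ cur [] (by simp) h
    simp [rsAltGo, hfind]
  | succ n ih =>
    intro s cur splits hn h
    match s with
    | [] =>
      rw [recursive_split]
      have hfind : PySem.Chars.find cur ['\n','\n'] = -1 := by
        simpa using rs_no_occ cur [] (by simp) h
      simp [rsAltGo, hfind]
    | [c] =>
      rw [recursive_split]
      have hfind : PySem.Chars.find (cur ++ [c]) ['\n','\n'] = -1 :=
        rs_no_occ cur [c] (by simp) h
      simp [rsAltGo, hfind]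
    | c :: d :: rest =>
      by_cases hcd : c = '\n' ∧ d = '\n'
      · obtain ⟨hc, hd⟩ := hcd
        subst hc; subst hd
        have hfind : PySem.Str.find (String.ofList (cur ++ '\n'::'\n'::rest)) "\n\n"
            = (cur.length : Int) := by
          simpa [nl_toList] using rs_find_at cur rest h
        rw [recursive_split]
        have hne : ((cur.length : Int)) ≠ -1 := by omega
        have hsl1 : PySem.Str.slice (String.ofList (cur ++ '\n'::'\n'::rest)) none
            (some (cur.length : Int)) = String.ofList cur := by
          apply String.toList_inj.mp
          rw [PySem.Str.toList_slice, PySem.Chars.slice_eq_listSlice]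
          simp [PySem.List.slice_to_natCast]
        have hsl2 : PySem.Str.slice (String.ofList (cur ++ '\n'::'\n'::rest))
            (some ((cur.length : Int) + 2)) none = String.ofList rest := by
          apply String.toList_inj.mp
          rw [PySem.Str.toList_slice, PySem.Chars.slice_eq_listSlice]
          have hcast : (cur.length : Int) + 2 = ((cur.length + 2 : Nat) : Int) := by omega
          rw [hcast, PySem.List.slice_from_natCast]
          have : cur ++ '\n'::'\n'::rest = (cur ++ ['\n','\n']) ++ rest := by simp
          rw [String.toList_ofList, this]
          have hl : cur.length + 2 = (cur ++ ['\n','\n']).length := by simp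
          rw [hl, List.drop_left]
          simp
        have hB : rsAltGo ('\n'::'\n'::rest) cur splits
            = rsAltGo rest [] (splits ++ [String.ofList cur]) := by
          simp [rsAltGo]
        rw [hB]
        simp only [hfind, hne, dite_false, hsl1, hsl2]
        have := ih rest [] (splits ++ [String.ofList cur]) (by simp at hn ⊢; omega)
          (by intro j hj; simp at hj)
        simpa using this
      · have hB : rsAltGo (c :: d :: rest) cur splits
            = rsAltGo (d :: rest) (cur ++ [c]) splits := by
          simp [rsAltGo, hcd]
        rw [hB]
        have hassoc : (cur ++ [c]) ++ (d :: rest) = cur ++ c :: d :: rest := by simp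
        have h' : ∀ j, j < (cur ++ [c]).length →
            ¬ ['\n','\n'] <+: ((cur ++ [c]) ++ (d :: rest)).drop j := by
          intro j hj
          rw [hassoc]
          rcases Nat.lt_or_ge j cur.length with hlt | hge
          · exact h j hlt
          · have hjeq : j = cur.length := by simp at hj; omega
            subst hjeq
            rw [List.drop_left]
            intro hp
            rcases hp with ⟨t, ht⟩
            apply hcd
            constructor
            · exact (List.cons_eq_cons.mp ht).1.symm
            · exact (List.cons_eq_cons.mp (List.cons_eq_cons.mp ht).2).1.symm
        have := ih (d :: rest) (cur ++ [c]) splits (by simp at hn ⊢; omega) h'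
        rw [← hassoc]
        exact this

-- ===== VERDICT (by name: the statement is the Claim_ definition above) =====
theorem recursive_split_spec : Claim_equal_recursive_split := by
  intro contents splits _
  unfold Spec_recursive_split recursive_split_alt
  have := rs_eq_go contents.toList.length contents.toList [] splits (le_refl _)
    (by intro j hj; simp at hj)
  simpa using this
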